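-- pv_equiv track=rewrite | github.com/Dyfeomorfizm/PiwPawJasnaCholera | app.py | check_where_is
-- ===== SOURCE A (Python) =====
-- def check_where_is(bars):
--     d = {}
--     for address in ["parkingowa", "foksal"]:
--         for bar in bars:
--             if address in bar.lower():
--                 d[address] = "jest"
--                 break
--         else:
--             d[address] = "nie ma"
--     return d
-- ===== SOURCE B (Python) =====
-- def check_where_is(bars):
--     p = f = False
--     for bar in bars:
--         low = bar.lower()
--         p = p or "parkingowa" in low
--         f = f or "foksal" in low
--         if p and f:
--             break
--     return {"parkingowa": "jest" if p else "nie ma",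
--             "foksal": "jest" if f else "nie ma"}
-- ===== Notes on version B (the rewrite author's own statement) =====
-- stated objective: alternative
-- what changed: Replaces A's two sequential scans of bars (one per target address, via for/else) with a single pass maintaining two booleans that short-circuits once both addresses are found, building the result dict at the end.
import Mathlib
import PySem

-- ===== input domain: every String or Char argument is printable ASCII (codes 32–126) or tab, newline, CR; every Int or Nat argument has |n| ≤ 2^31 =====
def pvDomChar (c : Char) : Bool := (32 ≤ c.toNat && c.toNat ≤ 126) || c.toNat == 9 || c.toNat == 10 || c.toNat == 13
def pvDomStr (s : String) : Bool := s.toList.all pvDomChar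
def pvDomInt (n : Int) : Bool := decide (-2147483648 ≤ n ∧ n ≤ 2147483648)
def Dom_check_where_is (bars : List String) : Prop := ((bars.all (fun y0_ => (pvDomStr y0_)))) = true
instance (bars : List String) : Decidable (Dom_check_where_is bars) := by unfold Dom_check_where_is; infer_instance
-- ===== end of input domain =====

-- ===== PORT A =====
-- B changes: one pass over bars with two booleans instead of A's two for/else scans (alternative decomposition, same cost).
-- inner for/else over bars: first bar containing address -> "jest", else "nie ma"
def pvFindA (address : String) : List String → String
  | [] => "nie ma"
  | bar :: rest =>
    if PySem.Str.isIn address (PySem.Str.lower bar) then "jest" else pvFindA address rest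

def check_where_is (bars : List String) : List (String × String) :=
  (["parkingowa", "foksal"].foldl
    (fun (d : PySem.Dict String String) address => d.insert address (pvFindA address bars))
    PySem.Dict.empty).items

-- ===== PORT B =====
def pvLoopB : List String → Bool → Bool → Bool × Bool
  | [], p, f => (p, f)
  | bar :: rest, p, f =>
    let low := PySem.Str.lower bar
    let p := p || PySem.Str.isIn "parkingowa" low
    let f := f || PySem.Str.isIn "foksal" low
    if p && f then (p, f) else pvLoopB rest p f

def check_where_is_alt (bars : List String) : List (String × String) :=
  let r := pvLoopB bars false false
  [("parkingowa", if r.1 then "jest" else "nie ma"),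
   ("foksal", if r.2 then "jest" else "nie ma")]

-- ===== PRECONDITION & SPEC =====
def Spec_check_where_is (bars : List String) (out : List (String × String)) : Prop := out = check_where_is_alt bars
instance (bars : List String) (out : List (String × String)) : Decidable (Spec_check_where_is bars out) := by unfold Spec_check_where_is; infer_instance

-- ===== CLAIM (what is proved, stated in full; the proofs are below) =====
def Claim_equal_check_where_is : Prop := ∀ (bars : List String), Dom_check_where_is bars → Spec_check_where_is bars (check_where_is bars)

-- ===== LEMMAS AND PROOFS =====
theorem pvFindA_eq_any (address : String) (bars : List String) :
    pvFindA address bars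
      = if bars.any (fun b => PySem.Str.isIn address (PySem.Str.lower b)) then "jest" else "nie ma" := by
  induction bars with
  | nil => rfl
  | cons bar rest ih =>
    simp only [pvFindA, List.any_cons, ih, Bool.or_eq_true]
    split_ifs <;> first | rfl | tauto

theorem pvLoopB_eq_any (bars : List String) (p f : Bool) :
    pvLoopB bars p f
      = (p || bars.any (fun b => PySem.Str.isIn "parkingowa" (PySem.Str.lower b)),
         f || bars.any (fun b => PySem.Str.isIn "foksal" (PySem.Str.lower b))) := by
  induction bars generalizing p f with
  | nil => simp [pvLoopB]
  | cons bar rest ih =>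
    simp only [pvLoopB, List.any_cons, ih]
    split_ifs with h
    · rcases (Bool.and_eq_true _ _).mp h with ⟨hp, hf⟩
      rw [Prod.mk.injEq]
      refine ⟨?_, ?_⟩ <;> rw [← Bool.or_assoc]
      · rw [hp, Bool.true_or]
      · rw [hf, Bool.true_or]
    · simp [Bool.or_assoc]

-- ===== VERDICT (by name: the statement is the Claim_ definition above) =====
theorem check_where_is_spec : Claim_equal_check_where_is := by
  intro bars _
  show check_where_is bars = check_where_is_alt bars
  simp [check_where_is, check_where_is_alt, pvFindA_eq_any, pvLoopB_eq_any, PySem.Dict.insert, PySem.Dict.empty, List.foldl]
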